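-- pv_equiv track=rewrite | github.com/arthurhaas/hashcode2k20 | practice round/algo_analyser.py | solve_3_complex_algo_forwards
-- ===== SOURCE A (Python) =====
-- def getFalseArray(length):
--     falseArray = []
--     for i in range(length):
--         falseArray.append(False)
--     return falseArray
--
-- def solve_3_complex_algo_forwards(max_slices, num_types, slices):
--
--     best_array = []
--     best_array_slices = []
--     used_slices = getFalseArray(len(slices))
--     for i in range(len(slices)-1, -1, -1):
--         counter = slices[i]
--         used_slices[i] = True
--         for j in range(len(slices)):
--             if used_slices[j] == False:
--                 if counter + slices[j] <= max_slices:
--                     used_slices[j] = True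
--                     counter += slices[j]
--                 else:
--                     break
--
--         best_array.append(counter)
--         used_slices_num = []
--         for b in range(len(used_slices)):
--             if used_slices[b] == True:
--                 used_slices_num.append(b)
--         best_array_slices.append(used_slices_num)
--         used_slices = getFalseArray(len(slices))
--
--     maxv = -1
--     maxi = -1
--     for i in range(len(best_array)):
--         if maxv < best_array[i]:
--             maxi = i
--             maxv = best_array[i]
--
--     return best_array_slices[maxi]
-- ===== SOURCE B (Python) =====
-- def solve_3_complex_algo_forwards(max_slices, num_types, slices):
--     # Prefix-sum reformulation: the greedy scan from start i takes slices[i] plus the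
--     # longest prefix of the list (skipping i) before the first overflow, so each
--     # candidate total is read off prefix sums; only the winning set is rebuilt, once.
--     n = len(slices)
--     P = [0]
--     for x in slices:
--         P.append(P[-1] + x)
--
--     def break_points(i):
--         # first j < i where adding slices[j] would overflow, else first j > i where
--         # the whole prefix (which then contains slices[i]) overflows
--         t = next((j for j in range(i) if P[j + 1] > max_slices - slices[i]), None)
--         if t is not None:
--             return t, None
--         u = next((j for j in range(i + 1, n) if P[j + 1] > max_slices), None)
--         return None, u
--
--     best_total = -1
--     best_i = 0
--     for i in range(n - 1, -1, -1):
--         t, u = break_points(i)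
--         if t is not None:
--             total = slices[i] + P[t]
--         elif u is not None:
--             total = P[u]
--         else:
--             total = P[n]
--         if total > best_total:
--             best_total = total
--             best_i = i
--
--     t, u = break_points(best_i)
--     if t is not None:
--         return list(range(t)) + [best_i]
--     return list(range(u if u is not None else n))
-- ===== Notes on version B (the rewrite author's own statement) =====
-- stated objective: faster
-- what changed: Replaces the per-start O(n) boolean-array simulation (rebuilding the used array and the index set for every start, then a separate argmax pass) by a prefix-sum characterization: each start's greedy total is read off the first prefix-sum break point, the best start is kept in one fold, and only the winning index set is reconstructed once.
import Mathlib
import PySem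

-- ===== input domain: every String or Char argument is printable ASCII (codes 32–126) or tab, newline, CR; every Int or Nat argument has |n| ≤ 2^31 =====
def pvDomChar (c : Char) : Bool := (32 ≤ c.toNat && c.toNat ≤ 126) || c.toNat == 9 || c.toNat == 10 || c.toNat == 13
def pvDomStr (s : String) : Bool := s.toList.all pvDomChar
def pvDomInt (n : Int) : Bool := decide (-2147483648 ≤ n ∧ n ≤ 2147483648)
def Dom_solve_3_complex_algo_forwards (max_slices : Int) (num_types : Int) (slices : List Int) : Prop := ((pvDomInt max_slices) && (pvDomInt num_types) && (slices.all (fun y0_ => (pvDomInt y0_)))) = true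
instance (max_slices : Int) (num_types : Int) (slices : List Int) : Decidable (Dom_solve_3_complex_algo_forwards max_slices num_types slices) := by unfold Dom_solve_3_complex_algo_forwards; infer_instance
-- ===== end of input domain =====

-- B replaces A's per-start boolean-array simulation by a prefix-sum break-point
-- characterization and reconstructs only the winning index set once (measured faster).

-- ===== PORT A =====
def getFalseArray (length : Int) : List Bool :=
  (PySem.List.pyRange 0 length 1).foldl (fun acc _ => acc ++ [false]) []

-- the inner 'for j in range(len(slices))' loop with its break; state (counter, used_slices)
def pvInnerA (max_slices : Int) (slices : List Int) :
    List Int → Int → List Bool → Int × List Bool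
  | [], counter, used => (counter, used)
  | j :: js, counter, used =>
    if (PySem.List.pyGetD used j true) == false then
      if counter + PySem.List.pyGetD slices j 0 ≤ max_slices then
        pvInnerA max_slices slices js (counter + PySem.List.pyGetD slices j 0)
          (PySem.List.pySetD used j true)
      else (counter, used)
    else pvInnerA max_slices slices js counter used

-- one iteration of the outer 'for i in range(len(slices)-1, -1, -1)' loop
def pvBodyA (max_slices : Int) (slices : List Int)
    (st : List Int × List (List Int) × List Bool) (i : Int) :
    List Int × List (List Int) × List Bool :=
  let counter := PySem.List.pyGetD slices i 0
  let used := PySem.List.pySetD st.2.2 i true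
  let r := pvInnerA max_slices slices (PySem.List.pyRange 0 ((slices.length : Int)) 1) counter used
  let used_num := (PySem.List.pyRange 0 ((r.2.length : Int)) 1).foldl
    (fun acc b => if (PySem.List.pyGetD r.2 b false) == true then acc ++ [b] else acc) []
  (st.1 ++ [r.1], st.2.1 ++ [used_num], getFalseArray ((slices.length : Int)))

-- one iteration of the final max scan
def pvArgmaxA (best_array : List Int) (mm : Int × Int) (i : Int) : Int × Int :=
  if mm.1 < PySem.List.pyGetD best_array i 0 then (PySem.List.pyGetD best_array i 0, i) else mm

def solve_3_complex_algo_forwards (max_slices : Int) (num_types : Int) (slices : List Int) : List Int :=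
  let st := (PySem.List.pyRange ((slices.length : Int) - 1) (-1) (-1)).foldl
    (pvBodyA max_slices slices) ([], [], getFalseArray ((slices.length : Int)))
  let mm := (PySem.List.pyRange 0 ((st.1.length : Int)) 1).foldl (pvArgmaxA st.1) (-1, -1)
  (PySem.List.pyGet? st.2.1 mm.2).getD []

-- ===== PORT B =====
-- P = [0]; for x in slices: P.append(P[-1] + x)
def pvPrefixList (slices : List Int) : List Int :=
  slices.foldl (fun P x => P ++ [PySem.List.pyGetD P (-1) 0 + x]) [0]

-- next((j for j in range(i) if P[j+1] > max_slices - slices[i]), None)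
def pvFindT (max_slices : Int) (slices P : List Int) (i : Nat) : Option Nat :=
  (List.range i).find? (fun j => decide (P.getD (j + 1) 0 > max_slices - slices.getD i 0))

-- next((j for j in range(i+1, n) if P[j+1] > max_slices), None)
def pvFindU (max_slices : Int) (P : List Int) (i n : Nat) : Option Nat :=
  (List.range' (i + 1) (n - (i + 1))).find? (fun j => decide (P.getD (j + 1) 0 > max_slices))

-- break_points(i) followed by the if/elif/else chain computing this start's total
def pvTotalB (max_slices : Int) (slices P : List Int) (n i : Nat) : Int :=
  match pvFindT max_slices slices P i with
  | some t => slices.getD i 0 + P.getD t 0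
  | none =>
    match pvFindU max_slices P i n with
    | some u => P.getD u 0
    | none => P.getD n 0

def solve_3_complex_algo_forwards_alt (max_slices : Int) (num_types : Int) (slices : List Int) : List Int :=
  let n := slices.length
  let P := pvPrefixList slices
  let st := ((List.range n).reverse).foldl
    (fun (st : Int × Nat) i =>
      if pvTotalB max_slices slices P n i > st.1 then (pvTotalB max_slices slices P n i, i) else st)
    (-1, 0)
  match pvFindT max_slices slices P st.2 with
  | some t => (List.range t).map (fun k => (k : Int)) ++ [(st.2 : Int)]
  | none =>
    match pvFindU max_slices P st.2 n with
    | some u => (List.range u).map (fun k => (k : Int))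
    | none => (List.range n).map (fun k => (k : Int))

-- ===== PRECONDITION & SPEC =====
-- A indexes best_array_slices[maxi] on an empty candidate list when slices = [],
-- raising IndexError; Pre_ excludes exactly the empty list.
def Pre_solve_3_complex_algo_forwards (max_slices : Int) (num_types : Int) (slices : List Int) : Prop :=
  slices ≠ []
instance (max_slices : Int) (num_types : Int) (slices : List Int) : Decidable (Pre_solve_3_complex_algo_forwards max_slices num_types slices) := by unfold Pre_solve_3_complex_algo_forwards; infer_instance

def pvWitness_solve_3_complex_algo_forwards : Int × Int × List Int := (10, 3, [3, 4, 5])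

def Spec_solve_3_complex_algo_forwards (max_slices : Int) (num_types : Int) (slices : List Int) (out : List Int) : Prop := out = solve_3_complex_algo_forwards_alt max_slices num_types slices
instance (max_slices : Int) (num_types : Int) (slices : List Int) (out : List Int) : Decidable (Spec_solve_3_complex_algo_forwards max_slices num_types slices out) := by unfold Spec_solve_3_complex_algo_forwards; infer_instance

-- ===== CLAIM (what is proved, stated in full; the proofs are below) =====
def Claim_equal_solve_3_complex_algo_forwards : Prop := ∀ (max_slices : Int) (num_types : Int) (slices : List Int), Dom_solve_3_complex_algo_forwards max_slices num_types slices → Pre_solve_3_complex_algo_forwards max_slices num_types slices → Spec_solve_3_complex_algo_forwards max_slices num_types slices (solve_3_complex_algo_forwards max_slices num_types slices)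

-- ===== LEMMAS AND PROOFS =====

-- mathematical description shared by both proofs: prefix sums, break points, masks
def pvS (sl : List Int) (j : Nat) : Int := (sl.take j).sum

def pvMask (n : Nat) (f : Nat → Bool) : List Bool := (List.range n).map f

-- first j in [k, i) whose addition overflows when slices[i] is already counted
def pvTFrom (m : Int) (sl : List Int) (i k : Nat) : Option Nat :=
  (List.range' k (i - k)).find? (fun j => decide (m - sl.getD i 0 < pvS sl (j + 1)))

-- first j in [k, n) where the whole prefix overflows
def pvFFrom (m : Int) (sl : List Int) (k n : Nat) : Option Nat :=
  (List.range' k (n - k)).find? (fun j => decide (m < pvS sl (j + 1)))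

def pvTotal (m : Int) (sl : List Int) (i : Nat) : Int :=
  match pvTFrom m sl i 0 with
  | some t => sl.getD i 0 + pvS sl t
  | none =>
    match pvFFrom m sl (i + 1) sl.length with
    | some u => pvS sl u
    | none => pvS sl sl.length

def pvSet (m : Int) (sl : List Int) (i : Nat) : List Int :=
  match pvTFrom m sl i 0 with
  | some t => (List.range t).map (fun k => (k : Int)) ++ [(i : Int)]
  | none =>
    match pvFFrom m sl (i + 1) sl.length with
    | some u => (List.range u).map (fun k => (k : Int))
    | none => (List.range sl.length).map (fun k => (k : Int))

-- generic small facts ------------------------------------------------------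

lemma pv_find_congr {α : Type} (p q : α → Bool) (l : List α)
    (h : ∀ a ∈ l, p a = q a) : l.find? p = l.find? q := by
  induction l with
  | nil => rfl
  | cons a l ih =>
    by_cases hq : q a = true
    · rw [List.find?_cons_of_pos (by rw [h a (by simp)]; exact hq),
          List.find?_cons_of_pos hq]
    · rw [List.find?_cons_of_neg (by rw [h a (by simp)]; simpa using hq),
          List.find?_cons_of_neg (by simpa using hq)]
      exact ih fun x hx => h x (by simp [hx])

lemma getFalseArray_eq (n : Nat) : getFalseArray (n : Int) = List.replicate n false := by
  unfold getFalseArray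
  rw [PySem.List.foldl_append_singleton_eq_map, PySem.List.pyRange_zero_nat]
  simp [List.map_map, List.map_const']

lemma replicate_eq_mask (n : Nat) : List.replicate n false = pvMask n (fun _ => false) := by
  simp [pvMask, List.map_const']

lemma mask_length (n : Nat) (f : Nat → Bool) : (pvMask n f).length = n := by
  simp [pvMask]

lemma mask_getD (n : Nat) (f : Nat → Bool) (b : Nat) (h : b < n) (d : Bool) :
    (pvMask n f).getD b d = f b := by
  exact PySem.List.getD_map_range f n b d h

lemma mask_set (n : Nat) (f : Nat → Bool) (k : Nat) (h : k < n) (v : Bool) :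
    (pvMask n f).set k v = pvMask n (fun b => if b = k then v else f b) := by
  apply List.ext_getElem
  · simp [pvMask]
  · intro idx h1 h2
    have hidx : idx < n := by simpa [pvMask] using h1
    simp [pvMask, List.getElem_set, eq_comm]

lemma mask_congr (n : Nat) (f g : Nat → Bool) (h : ∀ b, b < n → f b = g b) :
    pvMask n f = pvMask n g := by
  exact List.map_congr_left fun b hb => h b (List.mem_range.mp hb)

lemma pvS_succ (sl : List Int) (j : Nat) (h : j < sl.length) :
    pvS sl (j + 1) = pvS sl j + sl.getD j 0 := by
  unfold pvS
  rw [List.sum_take_succ _ _ h, List.getD_eq_getElem _ _ h]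

-- prefix list --------------------------------------------------------------

lemma pvPrefix_fold (l : List Int) : ∀ (acc : List Int) (c : Int),
    l.foldl (fun P x => P ++ [PySem.List.pyGetD P (-1) 0 + x]) (acc ++ [c]) =
    acc ++ (List.range (l.length + 1)).map (fun j => c + (l.take j).sum) := by
  induction l with
  | nil => intro acc c; simp
  | cons x xs ih =>
    intro acc c
    simp only [List.foldl_cons]
    rw [PySem.List.pyGetD_neg_one_append_singleton, ih (acc ++ [c]) (c + x)]
    rw [List.append_assoc]
    congr 1
    apply List.ext_getElem
    · simp
    · intro idx h1 h2
      rcases idx with _ | j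
      · simp
      · simp [List.take_succ_cons, add_assoc]

lemma pvPrefix_eq (sl : List Int) :
    pvPrefixList sl = (List.range (sl.length + 1)).map (fun j => pvS sl j) := by
  unfold pvPrefixList
  rw [show ([0] : List Int) = [] ++ [0] from rfl, pvPrefix_fold]
  simp [pvS]

lemma pvPrefix_getD (sl : List Int) (j : Nat) (h : j ≤ sl.length) :
    (pvPrefixList sl).getD j 0 = pvS sl j := by
  rw [pvPrefix_eq]
  exact PySem.List.getD_map_range _ _ _ _ (by omega)

-- bridges from B's find functions to the shared description -----------------

lemma findT_eq (m : Int) (sl : List Int) (i : Nat) (h : i ≤ sl.length) :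
    pvFindT m sl (pvPrefixList sl) i = pvTFrom m sl i 0 := by
  unfold pvFindT pvTFrom
  rw [List.range_eq_range']
  simp only [Nat.sub_zero]
  apply pv_find_congr
  intro j hj
  have hj' := List.mem_range'_1.mp hj
  rw [pvPrefix_getD sl (j + 1) (by omega)]

lemma findU_eq (m : Int) (sl : List Int) (i : Nat) :
    pvFindU m (pvPrefixList sl) i sl.length = pvFFrom m sl (i + 1) sl.length := by
  unfold pvFindU pvFFrom
  apply pv_find_congr
  intro j hj
  have hj' := List.mem_range'_1.mp hj
  rw [pvPrefix_getD sl (j + 1) (by omega)]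

lemma pvTFrom_lt (m : Int) (sl : List Int) (i k t : Nat) (h : pvTFrom m sl i k = some t) :
    t < i := by
  have := List.mem_range'_1.mp (List.mem_of_find?_eq_some h)
  omega

lemma pvFFrom_lt (m : Int) (sl : List Int) (k n u : Nat) (h : pvFFrom m sl k n = some u) :
    u < n := by
  have := List.mem_range'_1.mp (List.mem_of_find?_eq_some h)
  omega

lemma totalB_eq (m : Int) (sl : List Int) (i : Nat) (h : i ≤ sl.length) :
    pvTotalB m sl (pvPrefixList sl) sl.length i = pvTotal m sl i := by
  unfold pvTotalB pvTotal
  rw [findT_eq m sl i h, findU_eq]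
  cases ht : pvTFrom m sl i 0 with
  | some t =>
    have := pvTFrom_lt m sl i 0 t ht
    dsimp only
    rw [pvPrefix_getD sl t (by omega)]
  | none =>
    cases hu : pvFFrom m sl (i + 1) sl.length with
    | some u =>
      have := pvFFrom_lt m sl (i + 1) sl.length u hu
      dsimp only
      rw [pvPrefix_getD sl u (by omega)]
    | none =>
      dsimp only
      rw [pvPrefix_getD sl sl.length (le_refl _)]

lemma recon_eq (m : Int) (sl : List Int) (i : Nat) (h : i ≤ sl.length) :
    (match pvFindT m sl (pvPrefixList sl) i with
     | some t => (List.range t).map (fun k => (k : Int)) ++ [(i : Int)]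
     | none =>
       match pvFindU m (pvPrefixList sl) i sl.length with
       | some u => (List.range u).map (fun k => (k : Int))
       | none => (List.range sl.length).map (fun k => (k : Int))) = pvSet m sl i := by
  unfold pvSet
  rw [findT_eq m sl i h, findU_eq]

-- the inner greedy loop computes the break-point closed form ----------------

lemma phase2 (m : Int) (sl : List Int) : ∀ (d k : Nat), k + d = sl.length →
    pvInnerA m sl (PySem.List.pyRange (k : Int) ((sl.length : Int)) 1)
      (pvS sl k) (pvMask sl.length (fun b => decide (b < k))) =
    (match pvFFrom m sl k sl.length with
     | some u => (pvS sl u, pvMask sl.length (fun b => decide (b < u)))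
     | none => (pvS sl sl.length, pvMask sl.length (fun b => decide (b < sl.length)))) := by
  intro d
  induction d with
  | zero =>
    intro k hk
    have hk' : k = sl.length := by omega
    subst hk'
    have hF : pvFFrom m sl sl.length sl.length = none := by
      unfold pvFFrom
      simp
    rw [PySem.List.pyRange_one_eq_nil (le_refl _), hF]
    rfl
  | succ d ih =>
    intro k hk
    have hkn : k < sl.length := by omega
    rw [PySem.List.pyRange_one_cons (by exact_mod_cast hkn)]
    have hcast : ((k : Nat) : Int) + 1 = (((k + 1 : Nat)) : Int) := by push_cast; ring
    have hget : PySem.List.pyGetD (pvMask sl.length (fun b => decide (b < k))) ((k : Nat) : Int) true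
        = decide (k < k) := by
      rw [PySem.List.pyGetD_natCast, mask_getD _ _ _ hkn]
    have hsl : PySem.List.pyGetD sl ((k : Nat) : Int) 0 = sl.getD k 0 :=
      PySem.List.pyGetD_natCast sl k 0
    have hlen : sl.length - k = (sl.length - (k + 1)) + 1 := by omega
    by_cases hc : pvS sl k + sl.getD k 0 ≤ m
    · -- slice k still fits: it is taken
      have hset : PySem.List.pySetD (pvMask sl.length (fun b => decide (b < k))) ((k : Nat) : Int) true
          = pvMask sl.length (fun b => decide (b < k + 1)) := by
        rw [PySem.List.pySetD_natCast _ _ _, mask_set _ _ _ hkn]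
        exact mask_congr _ _ _ (fun b hb => by
          by_cases hbk : b = k
          · rw [if_pos hbk]
            symm
            rw [decide_eq_true_eq]
            omega
          · rw [if_neg hbk]
            simp only [decide_eq_decide]
            omega)
      have hF : pvFFrom m sl k sl.length = pvFFrom m sl (k + 1) sl.length := by
        unfold pvFFrom
        rw [hlen, List.range'_succ, List.find?_cons_of_neg (by have hS := pvS_succ sl k hkn; simp only [decide_eq_true_eq]; omega)]
      simp only [pvInnerA]
      rw [hget, hsl, hset]
      rw [if_pos (show (decide (k < k) == false) = true by simp)]
      rw [if_pos hc]
      rw [← pvS_succ sl k hkn, hcast, ih (k + 1) (by omega), hF]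
    · -- slice k overflows: break here
      have hF : pvFFrom m sl k sl.length = some k := by
        unfold pvFFrom
        rw [hlen, List.range'_succ, List.find?_cons_of_pos (by have hS := pvS_succ sl k hkn; simp only [decide_eq_true_eq]; omega)]
      simp only [pvInnerA]
      rw [hget, hsl, hF]
      rw [if_pos (show (decide (k < k) == false) = true by simp)]
      rw [if_neg hc]

lemma phase1 (m : Int) (sl : List Int) (i : Nat) (hi : i < sl.length) :
    ∀ (d k : Nat), k + d = i →
    pvInnerA m sl (PySem.List.pyRange (k : Int) ((sl.length : Int)) 1)
      (sl.getD i 0 + pvS sl k) (pvMask sl.length (fun b => decide (b < k ∨ b = i))) =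
    (match pvTFrom m sl i k with
     | some t => (sl.getD i 0 + pvS sl t, pvMask sl.length (fun b => decide (b < t ∨ b = i)))
     | none =>
       match pvFFrom m sl (i + 1) sl.length with
       | some u => (pvS sl u, pvMask sl.length (fun b => decide (b < u)))
       | none => (pvS sl sl.length, pvMask sl.length (fun b => decide (b < sl.length)))) := by
  intro d
  induction d with
  | zero =>
    intro k hk
    have hk' : i = k := by omega
    subst hk'
    have hT : pvTFrom m sl i i = none := by
      unfold pvTFrom
      simp
    rw [hT, PySem.List.pyRange_one_cons (by exact_mod_cast hi)]
    simp only [pvInnerA]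
    have hget : PySem.List.pyGetD (pvMask sl.length (fun b => decide (b < i ∨ b = i))) ((i : Nat) : Int) true
        = decide (i < i ∨ i = i) := by
      rw [PySem.List.pyGetD_natCast, mask_getD _ _ _ hi]
    rw [hget, if_neg (show ¬ (decide (i < i ∨ i = i) == false) = true by simp)]
    have hmask : pvMask sl.length (fun b => decide (b < i ∨ b = i))
        = pvMask sl.length (fun b => decide (b < i + 1)) :=
      mask_congr _ _ _ (fun b hb => by simp only [decide_eq_decide]; omega)
    have hcnt : sl.getD i 0 + pvS sl i = pvS sl (i + 1) := by
      rw [pvS_succ sl i hi]; ring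
    have hcast : ((i : Nat) : Int) + 1 = (((i + 1 : Nat)) : Int) := by push_cast; ring
    rw [hmask, hcnt, hcast]
    exact phase2 m sl (sl.length - (i + 1)) (i + 1) (by omega)
  | succ d ih =>
    intro k hk
    have hki : k < i := by omega
    have hkn : k < sl.length := by omega
    rw [PySem.List.pyRange_one_cons (by exact_mod_cast hkn)]
    simp only [pvInnerA]
    have hget : PySem.List.pyGetD (pvMask sl.length (fun b => decide (b < k ∨ b = i))) ((k : Nat) : Int) true
        = decide (k < k ∨ k = i) := by
      rw [PySem.List.pyGetD_natCast, mask_getD _ _ _ hkn]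
    have hsl : PySem.List.pyGetD sl ((k : Nat) : Int) 0 = sl.getD k 0 :=
      PySem.List.pyGetD_natCast sl k 0
    have hcast : ((k : Nat) : Int) + 1 = (((k + 1 : Nat)) : Int) := by push_cast; ring
    have hlen2 : i - k = (i - (k + 1)) + 1 := by omega
    rw [hget, hsl, if_pos (show (decide (k < k ∨ k = i) == false) = true by simp; omega)]
    by_cases hc : sl.getD i 0 + pvS sl k + sl.getD k 0 ≤ m
    · have hset : PySem.List.pySetD (pvMask sl.length (fun b => decide (b < k ∨ b = i))) ((k : Nat) : Int) true
          = pvMask sl.length (fun b => decide (b < k + 1 ∨ b = i)) := by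
        rw [PySem.List.pySetD_natCast _ _ _, mask_set _ _ _ hkn]
        exact mask_congr _ _ _ (fun b hb => by
          by_cases hbk : b = k
          · rw [if_pos hbk]
            symm
            rw [decide_eq_true_eq]
            omega
          · rw [if_neg hbk]
            simp only [decide_eq_decide]
            omega)
      have hT : pvTFrom m sl i k = pvTFrom m sl i (k + 1) := by
        unfold pvTFrom
        rw [hlen2, List.range'_succ,
            List.find?_cons_of_neg (by have hS := pvS_succ sl k hkn; simp only [decide_eq_true_eq]; omega)]
      have hcnt : sl.getD i 0 + pvS sl k + sl.getD k 0 = sl.getD i 0 + pvS sl (k + 1) := by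
        rw [pvS_succ sl k hkn]; ring
      rw [if_pos hc, hset, hcnt, hcast, ih (k + 1) (by omega), hT]
    · have hT : pvTFrom m sl i k = some k := by
        unfold pvTFrom
        rw [hlen2, List.range'_succ,
            List.find?_cons_of_pos (by have hS := pvS_succ sl k hkn; simp only [decide_eq_true_eq]; omega)]
      rw [if_neg hc, hT]

-- collecting the true indices of a mask -------------------------------------

lemma collect_eq (n : Nat) (f : Nat → Bool) :
    (PySem.List.pyRange 0 (((pvMask n f).length : Int)) 1).foldl
      (fun acc b => if (PySem.List.pyGetD (pvMask n f) b false) == true then acc ++ [b] else acc) [] =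
    ((List.range n).filter f).map (fun b => (b : Int)) := by
  rw [mask_length, PySem.List.pyRange_zero_nat, List.foldl_map]
  have hcong := PySem.List.foldl_congr_mem
      (l := List.range n) (init := ([] : List Int))
      (f := fun acc (b : Nat) =>
        if (PySem.List.pyGetD (pvMask n f) ((b : Nat) : Int) false == true) = true
        then acc ++ [((b : Nat) : Int)] else acc)
      (g := fun acc (b : Nat) => if f b then acc ++ [((b : Nat) : Int)] else acc)
      (fun acc b hb => by
        have hbn := List.mem_range.mp hb
        dsimp only
        rw [PySem.List.pyGetD_natCast, mask_getD n f b hbn]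
        simp)
  refine hcong.trans ?_
  rw [PySem.List.foldl_append_if]
  rw [List.nil_append]
  induction (List.filter f (List.range n)) with
  | nil => rfl
  | cons a l ih => simpa using ih

lemma filter_lt (n u : Nat) (h : u ≤ n) :
    (List.range n).filter (fun b => decide (b < u)) = List.range u := by
  induction n with
  | zero => have : u = 0 := by omega
            simp [this]
  | succ n ih =>
    rw [List.range_succ, List.filter_append]
    by_cases hu : u = n + 1
    · subst hu
      rw [List.filter_eq_self.mpr (fun b hb => by
            have := List.mem_range.mp hb; simp; omega)]
      simp [List.range_succ]
    · have hun : u ≤ n := by omega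
      rw [ih hun]
      have : ¬ (n < u) := by omega
      simp [this]

lemma filter_lt_or_eq (n t i : Nat) (ht : t ≤ i) (hi : i < n) :
    (List.range n).filter (fun b => decide (b < t ∨ b = i)) = List.range t ++ [i] := by
  induction n with
  | zero => exact absurd hi (Nat.not_lt_zero i)
  | succ n ih =>
    rw [List.range_succ, List.filter_append]
    by_cases hin : i = n
    · subst hin
      rw [List.filter_congr (q := fun b => decide (b < t)) (fun b hb => by
            have := List.mem_range.mp hb; simp; omega)]
      rw [filter_lt _ _ (by omega)]
      simp
    · have hi' : i < n := by omega
      rw [ih hi']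
      have h1 : ¬ (n < t) := by omega
      simp [h1, Ne.symm hin]

-- one outer iteration -------------------------------------------------------

lemma stepA_eq (m : Int) (sl : List Int) (i : Nat) (hi : i < sl.length)
    (a : List Int) (b : List (List Int)) :
    pvBodyA m sl (a, b, getFalseArray ((sl.length : Int))) ((i : Nat) : Int) =
      (a ++ [pvTotal m sl i], b ++ [pvSet m sl i], getFalseArray ((sl.length : Int))) := by
  unfold pvBodyA
  dsimp only
  have hmask0 : PySem.List.pySetD (getFalseArray ((sl.length : Int))) ((i : Nat) : Int) true
      = pvMask sl.length (fun b => decide (b < 0 ∨ b = i)) := by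
    rw [getFalseArray_eq, replicate_eq_mask, PySem.List.pySetD_natCast, mask_set _ _ _ hi]
    refine mask_congr _ _ _ (fun b hb => ?_)
    by_cases hbk : b = i
    · rw [if_pos hbk]
      symm
      rw [decide_eq_true_eq]
      omega
    · rw [if_neg hbk]
      simp [hbk]
  have hcnt : PySem.List.pyGetD sl ((i : Nat) : Int) 0 = sl.getD i 0 + pvS sl 0 := by
    rw [PySem.List.pyGetD_natCast]
    simp [pvS]
  have hphase := phase1 m sl i hi i 0 (by omega)
  rw [Nat.cast_zero] at hphase
  rw [hmask0, hcnt, hphase]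
  cases ht : pvTFrom m sl i 0 with
  | some t =>
    have htlt : t < i := pvTFrom_lt m sl i 0 t ht
    dsimp only
    rw [collect_eq sl.length (fun b => decide (b < t ∨ b = i)),
        filter_lt_or_eq sl.length t i (by omega) hi]
    unfold pvTotal pvSet
    rw [ht]
    simp
  | none =>
    cases hu : pvFFrom m sl (i + 1) sl.length with
    | some u =>
      have hult : u < sl.length := pvFFrom_lt m sl (i + 1) sl.length u hu
      dsimp only
      rw [collect_eq sl.length (fun b => decide (b < u)), filter_lt _ _ (by omega)]
      unfold pvTotal pvSet
      rw [ht, hu]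
    | none =>
      dsimp only
      rw [collect_eq sl.length (fun b => decide (b < sl.length)), filter_lt _ _ (le_refl _)]
      unfold pvTotal pvSet
      rw [ht, hu]

lemma foldl_tri {γ : Type}
    (step : (List Int × List (List Int) × List Bool) → γ → (List Int × List (List Int) × List Bool))
    (F : γ → Int) (G : γ → List Int) (c : List Bool) :
    ∀ (l : List γ), (∀ a b x, x ∈ l → step (a, b, c) x = (a ++ [F x], b ++ [G x], c)) →
    ∀ (a : List Int) (b : List (List Int)),
      l.foldl step (a, b, c) = (a ++ l.map F, b ++ l.map G, c) := by
  intro l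
  induction l with
  | nil => intro _ a b; simp
  | cons x xs ih =>
    intro h a b
    simp only [List.foldl_cons, List.map_cons]
    rw [h a b x (by simp), ih (fun a b y hy => h a b y (by simp [hy]))]
    simp

lemma arrays_eq (m : Int) (sl : List Int) :
    (PySem.List.pyRange ((sl.length : Int) - 1) (-1) (-1)).foldl
        (pvBodyA m sl) ([], [], getFalseArray ((sl.length : Int))) =
      ((List.range sl.length).map (fun k => pvTotal m sl (sl.length - 1 - k)),
       (List.range sl.length).map (fun k => pvSet m sl (sl.length - 1 - k)),
       getFalseArray ((sl.length : Int))) := by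
  rw [PySem.List.pyRange_neg_one]
  have hval : (((sl.length : Int) - 1) - (-1)).toNat = sl.length := by omega
  rw [hval]
  have hstep : ∀ (a : List Int) (b : List (List Int)) (x : Int),
      x ∈ (List.range sl.length).map (fun (k : Nat) => (sl.length : Int) - 1 - (k : Int)) →
      pvBodyA m sl (a, b, getFalseArray ((sl.length : Int))) x =
        (a ++ [pvTotal m sl x.toNat], b ++ [pvSet m sl x.toNat],
         getFalseArray ((sl.length : Int))) := by
    intro a b x hx
    obtain ⟨k, hk, rfl⟩ := List.mem_map.mp hx
    have hkn : k < sl.length := List.mem_range.mp hk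
    have hxe : (sl.length : Int) - 1 - (k : Int) = ((sl.length - 1 - k : Nat) : Int) := by
      omega
    rw [hxe]
    have htn : ((sl.length - 1 - k : Nat) : Int).toNat = sl.length - 1 - k := by omega
    rw [htn]
    exact stepA_eq m sl (sl.length - 1 - k) (by omega) a b
  rw [foldl_tri (pvBodyA m sl) (fun x => pvTotal m sl x.toNat) (fun x => pvSet m sl x.toNat)
        (getFalseArray ((sl.length : Int))) _ hstep [] []]
  rw [List.map_map, List.map_map, List.nil_append, List.nil_append]
  have hmap1 : (List.range sl.length).map
        ((fun x => pvTotal m sl x.toNat) ∘ (fun k : Nat => (sl.length : Int) - 1 - (k : Int)))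
      = (List.range sl.length).map (fun k => pvTotal m sl (sl.length - 1 - k)) :=
    List.map_congr_left (fun k hk => by
      have hkn := List.mem_range.mp hk
      simp only [Function.comp]
      congr 1
      omega)
  have hmap2 : (List.range sl.length).map
        ((fun x => pvSet m sl x.toNat) ∘ (fun k : Nat => (sl.length : Int) - 1 - (k : Int)))
      = (List.range sl.length).map (fun k => pvSet m sl (sl.length - 1 - k)) :=
    List.map_congr_left (fun k hk => by
      have hkn := List.mem_range.mp hk
      simp only [Function.comp]
      congr 1
      omega)
  rw [hmap1, hmap2]

-- the two selection loops ----------------------------------------------------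

lemma reverse_range (n : Nat) :
    (List.range n).reverse = (List.range n).map (fun k => n - 1 - k) := by
  apply List.ext_getElem
  · simp
  · intro idx h1 h2
    simp [List.getElem_reverse]

lemma argmax_fold_eq (v : Nat → Int) (n : Nat) :
    (PySem.List.pyRange 0 (((((List.range n).map v)).length : Int)) 1).foldl
        (pvArgmaxA ((List.range n).map v)) (-1, -1) =
    (List.range n).foldl
        (fun mm k => if mm.1 < v k then (v k, ((k : Nat) : Int)) else mm) (-1, -1) := by
  simp only [List.length_map, List.length_range]
  rw [PySem.List.pyRange_zero_nat, List.foldl_map]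
  apply PySem.List.foldl_congr_mem
  intro acc k hk
  have hkn := List.mem_range.mp hk
  unfold pvArgmaxA
  rw [PySem.List.pyGetD_natCast, PySem.List.getD_map_range v n k 0 hkn]

def pvRel (n : Nat) (A : Int × Int) (B : Int × Nat) : Prop :=
  B.1 = A.1 ∧ ((A.2 = -1 ∧ B.2 = 0) ∨ (∃ p, A.2 = ((p : Nat) : Int) ∧ p < n ∧ B.2 = n - 1 - p))

lemma argmax_rel (n : Nat) (v : Nat → Int) : ∀ (l : List Nat) (A : Int × Int) (B : Int × Nat),
    pvRel n A B → (∀ k ∈ l, k < n) →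
    pvRel n (l.foldl (fun mm k => if mm.1 < v k then (v k, ((k : Nat) : Int)) else mm) A)
            (l.foldl (fun st k => if v k > st.1 then (v k, n - 1 - k) else st) B) := by
  intro l
  induction l with
  | nil => intro A B hR _; exact hR
  | cons k l ih =>
    intro A B hR hmem
    obtain ⟨h1, h2⟩ := hR
    simp only [List.foldl_cons]
    by_cases hc : A.1 < v k
    · have hc' : v k > B.1 := by rw [h1]; exact hc
      rw [if_pos hc, if_pos hc']
      exact ih _ _ ⟨rfl, Or.inr ⟨k, rfl, hmem k (by simp), rfl⟩⟩
        (fun x hx => hmem x (by simp [hx]))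
    · have hc' : ¬ v k > B.1 := by rw [h1]; exact hc
      rw [if_neg hc, if_neg hc']
      exact ih _ _ ⟨h1, h2⟩ (fun x hx => hmem x (by simp [hx]))

-- ===== VERDICT (by name: the statement is the Claim_ definition above) =====
theorem solve_3_complex_algo_forwards_spec : Claim_equal_solve_3_complex_algo_forwards := by
  intro m nt sl hD hP
  unfold Spec_solve_3_complex_algo_forwards
  have hn : 0 < sl.length := List.length_pos_of_ne_nil hP
  unfold solve_3_complex_algo_forwards solve_3_complex_algo_forwards_alt
  dsimp only
  rw [arrays_eq m sl]
  dsimp only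
  rw [argmax_fold_eq (fun k => pvTotal m sl (sl.length - 1 - k)) sl.length]
  rw [reverse_range, List.foldl_map]
  have hBfold := PySem.List.foldl_congr_mem
    (l := List.range sl.length) (init := ((-1 : Int), (0 : Nat)))
    (f := fun (st : Int × Nat) (k : Nat) =>
      if pvTotalB m sl (pvPrefixList sl) sl.length (sl.length - 1 - k) > st.1
      then (pvTotalB m sl (pvPrefixList sl) sl.length (sl.length - 1 - k), sl.length - 1 - k)
      else st)
    (g := fun (st : Int × Nat) (k : Nat) =>
      if pvTotal m sl (sl.length - 1 - k) > st.1
      then (pvTotal m sl (sl.length - 1 - k), sl.length - 1 - k) else st)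
    (fun st k hk => by
      have hkn := List.mem_range.mp hk
      dsimp only
      rw [totalB_eq m sl (sl.length - 1 - k) (by omega)])
  rw [hBfold]
  have hrel := argmax_rel sl.length (fun k => pvTotal m sl (sl.length - 1 - k))
      (List.range sl.length) (-1, -1) (-1, 0)
      ⟨rfl, Or.inl ⟨rfl, rfl⟩⟩ (fun k hk => List.mem_range.mp hk)
  obtain ⟨h1, h2⟩ := hrel
  rcases h2 with ⟨hA2, hB2⟩ | ⟨p, hA2, hpn, hB2⟩
  · rw [hA2, hB2, PySem.List.pyGet?_neg_one]
    have hlast : ((List.range sl.length).map (fun k => pvSet m sl (sl.length - 1 - k))).getLast?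
        = some (pvSet m sl (sl.length - 1 - (sl.length - 1))) := by
      rw [List.getLast?_eq_getElem?]
      simp [hn]
    have h0 : sl.length - 1 - (sl.length - 1) = 0 := by omega
    rw [hlast, h0, recon_eq m sl 0 (by omega)]
    rfl
  · rw [hA2, hB2, PySem.List.pyGet?_natCast, recon_eq m sl (sl.length - 1 - p) (by omega)]
    simp [hpn]
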